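-- pv_equiv track=rewrite | github.com/matthew-pisano/ChipFiring | src/utils.py | prettyCok
-- ===== SOURCE A (Python) =====
-- def prettyCok(coKernel: tuple, compact=False):
--     cokStr = ""
--     mult = 1
--     lastFactor = None
--     if not compact:
--         for factor in coKernel[1]:
--             cokStr += f"\u2124_{factor} x "
--     else:
--         for factor in coKernel[1]:
--             if lastFactor == factor:
--                 mult += 1
--             elif mult > 1:
--                 cokStr += f"({mult})\u2124_{lastFactor} x "
--                 mult = 1
--             elif lastFactor is not None:
--                 cokStr += f"\u2124_{lastFactor} x "
--             lastFactor = factor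
--         if mult > 1 and lastFactor is not None:
--             cokStr += f"({mult})\u2124_{lastFactor} x "
--         elif lastFactor is not None:
--             cokStr += f"\u2124_{lastFactor} x "
--
--     if coKernel[2] > 0:
--         cokStr += "\u2124" + (f"^{coKernel[2]}" if coKernel[2] > 1 else "")
--     else:
--         cokStr = cokStr[:-2]
--     return cokStr
-- ===== SOURCE B (Python) =====
-- def prettyCok(coKernel: tuple, compact=False):
--     factors = coKernel[1]
--     if compact:
--         # phase 1: group consecutive equal factors into (factor, count) runs
--         runs = []
--         n = len(factors)
--         i = 0
--         while i < n:
--             j = i + 1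
--             while j < n and factors[j] == factors[i]:
--                 j += 1
--             runs.append((factors[i], j - i))
--             i = j
--         # phase 2: render the runs
--         parts = [("({})".format(c) if c > 1 else "") + "\u2124_{} x ".format(f)
--                  for f, c in runs]
--     else:
--         parts = ["\u2124_{} x ".format(f) for f in factors]
--     s = "".join(parts)
--     if coKernel[2] > 0:
--         return s + "\u2124" + ("^{}".format(coKernel[2]) if coKernel[2] > 1 else "")
--     return s[:-2]
-- ===== Notes on version B (the rewrite author's own statement) =====
-- stated objective: alternative
-- what changed: The compact branch's stateful delayed-emission loop (mult/lastFactor state machine with a post-loop flush) is replaced by a two-phase decomposition: first group consecutive equal factors into (factor, count) runs, then render each run; the non-compact branch becomes map-then-join.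
import Mathlib
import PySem

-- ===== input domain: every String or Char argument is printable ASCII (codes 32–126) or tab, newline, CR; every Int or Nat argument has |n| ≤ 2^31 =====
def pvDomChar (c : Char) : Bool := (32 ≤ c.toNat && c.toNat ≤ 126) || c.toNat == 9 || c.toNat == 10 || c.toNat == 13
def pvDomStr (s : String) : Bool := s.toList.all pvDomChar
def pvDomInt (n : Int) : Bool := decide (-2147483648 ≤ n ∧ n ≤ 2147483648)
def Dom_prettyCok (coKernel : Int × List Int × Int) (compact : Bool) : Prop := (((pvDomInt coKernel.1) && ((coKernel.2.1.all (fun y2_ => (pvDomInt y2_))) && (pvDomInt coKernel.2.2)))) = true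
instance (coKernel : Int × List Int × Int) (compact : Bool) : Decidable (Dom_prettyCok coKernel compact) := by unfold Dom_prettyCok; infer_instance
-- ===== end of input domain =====

-- B replaces A's stateful delayed-emission loop in the compact branch by a two-phase
-- build-runs-then-render decomposition (objective: alternative; same behaviour, same cost).

-- ===== PORT A =====
-- f"{lastFactor}" on an Optional[int]; prints "None" for None (that branch is unreachable in A's flow)
def pvOptIntStr : Option Int → String
  | none => "None"
  | some v => PySem.Int.toStr v

-- the body of A's compact for-loop, on state (cokStr, mult, lastFactor)
def prettyCokStepC (st : String × Int × Option Int) (factor : Int) : String × Int × Option Int :=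
  if st.2.2 == some factor then (st.1, st.2.1 + 1, st.2.2)
  else if st.2.1 > 1 then (st.1 ++ "(" ++ PySem.Int.toStr st.2.1 ++ ")\u2124_" ++ pvOptIntStr st.2.2 ++ " x ", 1, some factor)
  else if st.2.2.isSome then (st.1 ++ "\u2124_" ++ pvOptIntStr st.2.2 ++ " x ", 1, some factor)
  else (st.1, st.2.1, some factor)

def prettyCok (coKernel : Int × List Int × Int) (compact : Bool) : String :=
  let cokStr :=
    if !compact then
      coKernel.2.1.foldl (fun s factor => s ++ "\u2124_" ++ PySem.Int.toStr factor ++ " x ") ""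
    else
      let st := coKernel.2.1.foldl prettyCokStepC ("", 1, none)
      -- the two trailing flush branches after the loop
      if st.2.1 > 1 && st.2.2.isSome then
        st.1 ++ "(" ++ PySem.Int.toStr st.2.1 ++ ")\u2124_" ++ pvOptIntStr st.2.2 ++ " x "
      else if st.2.2.isSome then st.1 ++ "\u2124_" ++ pvOptIntStr st.2.2 ++ " x "
      else st.1
  if coKernel.2.2 > 0 then
    cokStr ++ "\u2124" ++ (if coKernel.2.2 > 1 then "^" ++ PySem.Int.toStr coKernel.2.2 else "")
  else
    String.ofList (PySem.List.slice cokStr.toList none (some (-2)))   -- cokStr[:-2]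

-- ===== PORT B =====
-- Source B's inner while loop: advance j while j < n and factors[j] == factors[i]
def pvScanEnd (factors : List Int) (fi : Int) (j : Nat) : Nat :=
  if h : j < factors.length then
    if factors[j] == fi then pvScanEnd factors fi (j + 1) else j
  else j
termination_by factors.length - j

-- needed by pvBuildRunsFrom's decreasing_by
theorem pvScanEnd_ge (factors : List Int) (fi : Int) (j : Nat) : j ≤ pvScanEnd factors fi j := by
  rw [pvScanEnd]
  split
  · split
    · have := pvScanEnd_ge factors fi (j + 1); omega
    · omega
  · omega
termination_by factors.length - j

-- Source B's outer while loop: consecutive-equal runs as (factor, count), by index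
def pvBuildRunsFrom (factors : List Int) (i : Nat) : List (Int × Int) :=
  if h : i < factors.length then
    let j := pvScanEnd factors factors[i] (i + 1)
    (factors[i], ((j : Int) - (i : Int))) :: pvBuildRunsFrom factors j
  else []
termination_by factors.length - i
decreasing_by
  have := pvScanEnd_ge factors factors[i] (i + 1)
  omega

-- render of one run in the compact list comprehension
def pvRenderRun (r : Int × Int) : String :=
  (if r.2 > 1 then "(" ++ PySem.Int.toStr r.2 ++ ")" else "") ++ "ℤ_" ++ PySem.Int.toStr r.1 ++ " x "

-- exact port of "".join(parts)
def pvJoinAll : List String → String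
  | [] => ""
  | p :: ps => p ++ pvJoinAll ps

def prettyCok_alt (coKernel : Int × List Int × Int) (compact : Bool) : String :=
  let parts :=
    if compact then (pvBuildRunsFrom coKernel.2.1 0).map pvRenderRun
    else coKernel.2.1.map (fun f => "ℤ_" ++ PySem.Int.toStr f ++ " x ")
  let s := pvJoinAll parts
  if coKernel.2.2 > 0 then
    s ++ "ℤ" ++ (if coKernel.2.2 > 1 then "^" ++ PySem.Int.toStr coKernel.2.2 else "")
  else
    String.ofList (PySem.List.slice s.toList none (some (-2)))   -- s[:-2]

-- ===== PRECONDITION & SPEC =====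
def Spec_prettyCok (coKernel : Int × List Int × Int) (compact : Bool) (out : String) : Prop := out = prettyCok_alt coKernel compact
instance (coKernel : Int × List Int × Int) (compact : Bool) (out : String) : Decidable (Spec_prettyCok coKernel compact out) := by unfold Spec_prettyCok; infer_instance

-- ===== CLAIM (what is proved, stated in full; the proofs are below) =====
def Claim_equal_prettyCok : Prop := ∀ (coKernel : Int × List Int × Int) (compact : Bool), Dom_prettyCok coKernel compact → Spec_prettyCok coKernel compact (prettyCok coKernel compact)

-- ===== LEMMAS AND PROOFS =====

-- proof-side recursion: how many further leading elements equal f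
def pvCountRun (f : Int) : List Int → Nat
  | [] => 0
  | x :: xs => if x == f then 1 + pvCountRun f xs else 0

-- proof-side runs on lists (structural version of pvBuildRunsFrom)
def pvBuildRuns : List Int → List (Int × Int)
  | [] => []
  | f :: rest =>
      let k := pvCountRun f rest
      (f, (k : Int) + 1) :: pvBuildRuns (rest.drop k)
termination_by xs => xs.length
decreasing_by
  simp only [List.length_cons, List.length_drop]
  omega

-- the index-based port computes the structural runs of the suffix
theorem pvScanEnd_eq (xs : List Int) (f : Int) (j : Nat) :
    pvScanEnd xs f j = j + pvCountRun f (xs.drop j) := by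
  rw [pvScanEnd]
  split
  · next h =>
      have hd : xs.drop j = xs[j] :: xs.drop (j + 1) := List.drop_eq_getElem_cons h
      rw [hd]
      split
      · next hb => rw [pvScanEnd_eq xs f (j + 1)]; simp [pvCountRun, hb]; omega
      · next hb => simp [pvCountRun, hb]
  · next h =>
      have hnil : xs.drop j = [] := List.drop_eq_nil_of_le (by omega)
      simp [hnil, pvCountRun]
termination_by xs.length - j

theorem pvBuildRunsFrom_eq (xs : List Int) (i : Nat) :
    pvBuildRunsFrom xs i = pvBuildRuns (xs.drop i) := by
  rw [pvBuildRunsFrom]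
  split
  · next h =>
      have hd : xs.drop i = xs[i] :: xs.drop (i + 1) := List.drop_eq_getElem_cons h
      have hse := pvScanEnd_eq xs xs[i] (i + 1)
      have hrec := pvBuildRunsFrom_eq xs (pvScanEnd xs xs[i] (i + 1))
      rw [hd, pvBuildRuns]
      rw [hse] at hrec
      simp only [hse]
      rw [hrec]
      rw [List.drop_drop]
      congr 1
      congr 1
      push_cast
      ring
  · next h =>
      have hnil : xs.drop i = [] := List.drop_eq_nil_of_le (by omega)
      simp [hnil, pvBuildRuns]
termination_by xs.length - i
decreasing_by
  have := pvScanEnd_ge xs xs[i] (i + 1)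
  omega

-- non-compact branch: A's appending fold = "".join of B's mapped parts
theorem pv_noncompact (xs : List Int) (acc : String) :
    xs.foldl (fun s factor => s ++ "\u2124_" ++ PySem.Int.toStr factor ++ " x ") acc
      = acc ++ pvJoinAll (xs.map (fun f => "\u2124_" ++ PySem.Int.toStr f ++ " x ")) := by
  induction xs generalizing acc with
  | nil => simp [pvJoinAll]
  | cons x xs ih =>
      rw [List.foldl_cons, ih]
      simp [pvJoinAll, String.append_assoc]

-- A's final two flush branches, as a function of the loop's final state
def pvFlush (st : String × Int × Option Int) : String :=
  if st.2.1 > 1 && st.2.2.isSome then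
    st.1 ++ "(" ++ PySem.Int.toStr st.2.1 ++ ")\u2124_" ++ pvOptIntStr st.2.2 ++ " x "
  else if st.2.2.isSome then st.1 ++ "\u2124_" ++ pvOptIntStr st.2.2 ++ " x "
  else st.1

-- compact branch main invariant: running A's loop from an in-progress run (f, m)
-- and flushing equals the already-emitted text plus B's rendering of the remaining runs
theorem pv_compact_loop (xs : List Int) : ∀ (f : Int) (m : Int) (acc : String), 1 ≤ m →
    pvFlush (xs.foldl prettyCokStepC (acc, m, some f))
      = acc ++ pvRenderRun (f, m + (pvCountRun f xs : Int))
            ++ pvJoinAll ((pvBuildRuns (xs.drop (pvCountRun f xs))).map pvRenderRun) := by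
  induction xs with
  | nil =>
      intro f m acc hm
      simp only [List.foldl_nil, pvFlush, pvRenderRun, pvCountRun, List.drop_nil, pvBuildRuns,
        List.map_nil, pvJoinAll, pvOptIntStr, Option.isSome_some, Bool.and_true,
        Nat.cast_zero, add_zero, String.append_empty]
      by_cases hm1 : m > 1
      · simp [hm1, String.append_assoc]
      · simp [hm1, String.append_assoc]
  | cons x xs ih =>
      intro f m acc hm
      by_cases hfx : f = x
      · subst hfx
        have hstep : prettyCokStepC (acc, m, some f) f = (acc, m + 1, some f) := by
          simp [prettyCokStepC]
        rw [List.foldl_cons, hstep, ih f (m + 1) acc (by omega)]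
        have hcr : pvCountRun f (f :: xs) = 1 + pvCountRun f xs := by
          simp [pvCountRun]
        rw [hcr]
        have harg : m + 1 + (pvCountRun f xs : Int) = m + ((1 + pvCountRun f xs : Nat) : Int) := by
          push_cast; ring
        rw [harg]
        have hdrop : xs.drop (pvCountRun f xs) = (f :: xs).drop (1 + pvCountRun f xs) := by
          simp [List.drop_succ_cons, Nat.add_comm]
        rw [hdrop]
      · -- x starts a new run: A emits the pending run, B's countRun stops here
        have hne : (some f == some x) = false := by simp [hfx]
        have hcr : pvCountRun f (x :: xs) = 0 := by simp [pvCountRun, Ne.symm hfx]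
        have hruns : pvBuildRuns (x :: xs)
            = (x, (pvCountRun x xs : Int) + 1) :: pvBuildRuns (xs.drop (pvCountRun x xs)) := by
          rw [pvBuildRuns]
        have harg2 : (1 : Int) + (pvCountRun x xs : Int) = (pvCountRun x xs : Int) + 1 := by ring
        by_cases hm1 : m > 1
        · have hstep : prettyCokStepC (acc, m, some f) x
              = (acc ++ "(" ++ PySem.Int.toStr m ++ ")ℤ_" ++ pvOptIntStr (some f) ++ " x ", 1, some x) := by
            simp [prettyCokStepC, hne, hm1]
          rw [List.foldl_cons, hstep, ih x 1 _ (by omega)]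
          simp only [hcr, Nat.cast_zero, add_zero, List.drop_zero]
          rw [hruns]
          simp only [List.map_cons, pvJoinAll, harg2]
          simp [pvRenderRun, pvOptIntStr, hm1, String.append_assoc]
        · have hmeq : m = 1 := by omega
          subst hmeq
          have hstep : prettyCokStepC (acc, 1, some f) x
              = (acc ++ "ℤ_" ++ pvOptIntStr (some f) ++ " x ", 1, some x) := by
            simp [prettyCokStepC, hne]
          rw [List.foldl_cons, hstep, ih x 1 _ (by omega)]
          simp only [hcr, Nat.cast_zero, add_zero, List.drop_zero]
          rw [hruns]
          simp only [List.map_cons, pvJoinAll, harg2]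
          simp [pvRenderRun, pvOptIntStr, String.append_assoc]

-- compact branch, from the initial state
theorem pv_compact (xs : List Int) :
    pvFlush (xs.foldl prettyCokStepC ("", 1, none))
      = pvJoinAll ((pvBuildRuns xs).map pvRenderRun) := by
  cases xs with
  | nil => simp [pvFlush, pvBuildRuns, pvJoinAll]
  | cons f rest =>
      have hstep : prettyCokStepC ("", 1, none) f = ("", 1, some f) := by
        simp [prettyCokStepC]
      rw [List.foldl_cons, hstep, pv_compact_loop rest f 1 "" (by omega)]
      have hruns : pvBuildRuns (f :: rest)
          = (f, (pvCountRun f rest : Int) + 1) :: pvBuildRuns (rest.drop (pvCountRun f rest)) := by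
        rw [pvBuildRuns]
      have harg : (1 : Int) + (pvCountRun f rest : Int) = (pvCountRun f rest : Int) + 1 := by ring
      rw [hruns, harg]
      simp [pvJoinAll]

-- ===== VERDICT (by name: the statement is the Claim_ definition above) =====
theorem prettyCok_spec : Claim_equal_prettyCok := by
  intro coKernel compact _
  show prettyCok coKernel compact = prettyCok_alt coKernel compact
  obtain ⟨a, factors, r⟩ := coKernel
  cases compact with
  | false =>
      simp [prettyCok, prettyCok_alt, pv_noncompact]
  | true =>
      have h := pv_compact factors
      simp [pvFlush] at h
      simp [prettyCok, prettyCok_alt, h, pvBuildRunsFrom_eq]
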